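-- pv_equiv track=rewrite | github.com/nyucel/blm2010 | final/150401075.py | createEquationForAllDegrees
-- ===== SOURCE A (Python) =====
-- def createEquationForAllDegrees(x, y, n, m):
--     arr = []
--     for i in range(m + 1):
--         line = []
--         for j in range(m + 1):
--             if i == 0 and j == 0:
--                 line.append(n)
--             else:
--                 xSum = 0
--                 for k in x:
--                     xSum += k ** (i + j)
--                 line.append(xSum)
--         total = 0
--         for l in range(n):
--             total += (x[l] ** i) * y[l]
--         line.append(total)
--         arr.append(line)
--     return arr
-- ===== SOURCE B (Python) =====
-- def createEquationForAllDegrees(x, y, n, m):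
--     # Precompute each power sum S_p = sum(k**p for k in x) once (p = 0..2m) and each
--     # moment T_i = sum(x[l]**i * y[l] for l < n) once, then fill the matrix by indexing.
--     S = [sum(k ** p for k in x) for p in range(2 * m + 1)]
--     T = [sum(x[l] ** i * y[l] for l in range(n)) for i in range(m + 1)]
--     return [[n if i == 0 and j == 0 else S[i + j] for j in range(m + 1)] + [T[i]]
--             for i in range(m + 1)]
-- ===== Notes on version B (the rewrite author's own statement) =====
-- stated objective: faster
-- what changed: Precomputes the 2m+1 power sums S_p and the m+1 moments T_i once and fills the matrix by table lookup, instead of re-summing over all of x for every matrix cell (intended as faster; measured several-fold faster at the sizes both finish, unconfirmed at sizes where both time out).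
import Mathlib
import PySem

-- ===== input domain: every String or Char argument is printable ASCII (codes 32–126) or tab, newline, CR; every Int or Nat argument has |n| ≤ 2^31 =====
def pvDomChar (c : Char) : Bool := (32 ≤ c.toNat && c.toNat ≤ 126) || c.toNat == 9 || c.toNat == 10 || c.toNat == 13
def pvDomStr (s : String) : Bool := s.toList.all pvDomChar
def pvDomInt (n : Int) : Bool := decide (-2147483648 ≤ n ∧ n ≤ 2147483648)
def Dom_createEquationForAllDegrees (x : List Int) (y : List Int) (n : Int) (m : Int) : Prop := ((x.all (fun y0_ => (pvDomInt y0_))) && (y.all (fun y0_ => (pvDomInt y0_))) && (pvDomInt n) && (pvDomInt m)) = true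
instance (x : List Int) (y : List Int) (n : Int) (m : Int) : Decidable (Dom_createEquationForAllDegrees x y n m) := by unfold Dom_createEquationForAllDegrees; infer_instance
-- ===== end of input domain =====

-- B precomputes the power sums S_p and moments T_i once and fills the matrix by indexing,
-- replacing A's per-cell re-summation over x; intended as faster (asymptotically fewer
-- power computations); measured several-fold faster at the sizes both finish, unconfirmed where both time out.


-- ===== PORT A =====
-- literal port of A: for each cell, re-sum k ** (i+j) over all of x; `k ** (i+j)` is
-- ported as `k ^ (i+j).toNat`, exact since i, j ≥ 0 inside the ranges.
def createEquationForAllDegrees (x : List Int) (y : List Int) (n : Int) (m : Int) : List (List Int) :=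
  (PySem.List.pyRange 0 (m+1) 1).foldl (fun arr i =>
    let line := (PySem.List.pyRange 0 (m+1) 1).foldl (fun line j =>
      if i = 0 ∧ j = 0 then line ++ [n]
      else line ++ [x.foldl (fun xSum k => xSum + k ^ (i+j).toNat) 0]) []
    let total := (PySem.List.pyRange 0 n 1).foldl
      (fun t l => t + (PySem.List.pyGetD x l 0) ^ i.toNat * PySem.List.pyGetD y l 0) 0
    arr ++ [line ++ [total]]) []

-- ===== PORT B =====
-- port of Source B: power sums S, moments T, then one map builds the matrix by indexing.
def createEquationForAllDegrees_alt (x : List Int) (y : List Int) (n : Int) (m : Int) : List (List Int) :=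
  let S := (PySem.List.pyRange 0 (2*m+1) 1).map
    (fun p => x.foldl (fun acc k => acc + k ^ p.toNat) 0)
  let T := (PySem.List.pyRange 0 (m+1) 1).map
    (fun i => (PySem.List.pyRange 0 n 1).foldl
      (fun acc l => acc + (PySem.List.pyGetD x l 0) ^ i.toNat * PySem.List.pyGetD y l 0) 0)
  (PySem.List.pyRange 0 (m+1) 1).map (fun i =>
    ((PySem.List.pyRange 0 (m+1) 1).map
      (fun j => if i = 0 ∧ j = 0 then n else PySem.List.pyGetD S (i+j) 0)) ++
    [PySem.List.pyGetD T i 0])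

-- ===== PRECONDITION & SPEC =====
-- Pre_ excludes exactly the inputs where A raises IndexError: when some row is built
-- (m ≥ 0), the loop `for l in range(n)` reads x[l] and y[l], so it needs n ≤ len(x)
-- and n ≤ len(y); for m < 0 both programs return [] without indexing.
def Pre_createEquationForAllDegrees (x : List Int) (y : List Int) (n : Int) (m : Int) : Prop :=
  m < 0 ∨ (n ≤ (x.length : Int) ∧ n ≤ (y.length : Int))
instance (x : List Int) (y : List Int) (n : Int) (m : Int) : Decidable (Pre_createEquationForAllDegrees x y n m) := by unfold Pre_createEquationForAllDegrees; infer_instance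
def pvWitness_createEquationForAllDegrees : List Int × List Int × Int × Int := ([1, 2], [3, 4], 2, 1)

def Spec_createEquationForAllDegrees (x : List Int) (y : List Int) (n : Int) (m : Int) (out : List (List Int)) : Prop := out = createEquationForAllDegrees_alt x y n m
instance (x : List Int) (y : List Int) (n : Int) (m : Int) (out : List (List Int)) : Decidable (Spec_createEquationForAllDegrees x y n m out) := by unfold Spec_createEquationForAllDegrees; infer_instance

-- ===== CLAIM (what is proved, stated in full; the proofs are below) =====
def Claim_equal_createEquationForAllDegrees : Prop := ∀ (x : List Int) (y : List Int) (n : Int) (m : Int), Dom_createEquationForAllDegrees x y n m → Pre_createEquationForAllDegrees x y n m → Spec_createEquationForAllDegrees x y n m (createEquationForAllDegrees x y n m)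

-- ===== LEMMAS AND PROOFS =====

-- ===== VERDICT (by name: the statement is the Claim_ definition above) =====
theorem createEquationForAllDegrees_spec : Claim_equal_createEquationForAllDegrees := by
  intro x y n m _ _
  unfold Spec_createEquationForAllDegrees createEquationForAllDegrees createEquationForAllDegrees_alt
  -- turn A's inner branch into a single append of a branched element
  have hfun : ∀ i : Int,
      (fun (line : List Int) (j : Int) =>
        if i = 0 ∧ j = 0 then line ++ [n]
        else line ++ [x.foldl (fun xSum k => xSum + k ^ (i+j).toNat) 0])
      = (fun line j => line ++
          [if i = 0 ∧ j = 0 then n else x.foldl (fun xSum k => xSum + k ^ (i+j).toNat) 0]) := by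
    intro i; funext line j; split_ifs <;> rfl
  simp only [hfun]
  simp only [PySem.List.foldl_append_singleton_eq_map, List.nil_append]
  apply List.map_congr_left
  intro i hi
  have hi' := (PySem.List.mem_pyRange_one).mp hi
  congr 1
  · apply List.map_congr_left
    intro j hj
    have hj' := (PySem.List.mem_pyRange_one).mp hj
    by_cases h : i = 0 ∧ j = 0
    · simp [h]
    · rw [if_neg h, if_neg h,
        PySem.List.pyGetD_map_pyRange_of_nonneg _ _ _ _ (by omega) (by omega)]
  · rw [PySem.List.pyGetD_map_pyRange_of_nonneg _ _ _ _ (by omega) (by omega)]
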